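-- pv_equiv track=rewrite | github.com/erickummelstedt/ubiquitinformatics | back_end/src/automation/OT2-code_ver1.1.py | sample_to_well_positions
-- ===== SOURCE A (Python) =====
-- def sample_to_well_positions(number_of_ubiquitin):
--     rows = "ABCDEFGH"
--     columns = range(1, 13)
--
--     well_positions = []
--
--     if number_of_ubiquitin < 1 or number_of_ubiquitin > 96:
--         raise ValueError("Sample number must be between 1 and 96")
--
--     for i in range(0, number_of_ubiquitin):
--         row = rows[i % 8]
--         column = columns[i // 8]
--         well_positions.append(f"{row}{column}")
--
--     return well_positions
-- ===== SOURCE B (Python) =====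
-- def sample_to_well_positions(number_of_ubiquitin):
--     if number_of_ubiquitin < 1 or number_of_ubiquitin > 96:
--         raise ValueError("Sample number must be between 1 and 96")
--
--     well_positions = []
--     for column in range(1, 13):
--         for row in "ABCDEFGH":
--             if len(well_positions) == number_of_ubiquitin:
--                 return well_positions
--             well_positions.append(f"{row}{column}")
--     return well_positions
-- ===== Notes on version B (the rewrite author's own statement) =====
-- stated objective: alternative
-- what changed: B enumerates the plate by nested loops (columns 1..12, then rows A..H) and stops once the list has number_of_ubiquitin entries, instead of A's single flat loop that recovers row and column from i%8 and i//8.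
import Mathlib
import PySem

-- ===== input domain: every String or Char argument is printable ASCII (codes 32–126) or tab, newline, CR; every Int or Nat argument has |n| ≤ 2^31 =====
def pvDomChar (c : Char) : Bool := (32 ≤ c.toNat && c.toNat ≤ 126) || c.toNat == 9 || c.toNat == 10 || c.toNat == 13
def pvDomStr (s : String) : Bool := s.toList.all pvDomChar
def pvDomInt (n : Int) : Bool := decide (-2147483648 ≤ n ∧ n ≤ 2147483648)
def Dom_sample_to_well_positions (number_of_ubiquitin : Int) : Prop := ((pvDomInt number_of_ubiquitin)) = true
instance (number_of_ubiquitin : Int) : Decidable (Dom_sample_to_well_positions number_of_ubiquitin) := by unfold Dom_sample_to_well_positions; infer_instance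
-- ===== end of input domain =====

-- B replaces A's flat loop with i%8 / i//8 arithmetic by nested column/row loops that
-- stop once the list holds number_of_ubiquitin labels (objective: alternative decomposition).

-- ===== PORT A =====
-- literal port: for i in range(0, n): row = "ABCDEFGH"[i % 8]; column = range(1,13)[i // 8]; append row+str(column)
def sample_to_well_positions (number_of_ubiquitin : Int) : List String :=
  let rows := "ABCDEFGH".toList
  let columns := PySem.List.pyRange 1 13 1
  (PySem.List.pyRange 0 number_of_ubiquitin 1).foldl (fun acc i =>
    match PySem.List.pyGet? rows (PySem.Int.mod i 8),
          PySem.List.pyGet? columns (PySem.Int.floordiv i 8) with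
    | some row, some column => acc ++ [String.ofList [row] ++ PySem.Int.toStr column]
    | _, _ => acc) []   -- unreachable inside Pre_ (indices in range there)

-- ===== PORT B =====
-- literal port of Source B: nested foldl over columns then rows; once the accumulator has
-- number_of_ubiquitin entries the inner body appends nothing (Python's early return).
def sample_to_well_positions_alt (number_of_ubiquitin : Int) : List String :=
  (PySem.List.pyRange 1 13 1).foldl (fun acc column =>
    "ABCDEFGH".toList.foldl (fun acc row =>
      if (acc.length : Int) = number_of_ubiquitin then acc
      else acc ++ [String.ofList [row] ++ PySem.Int.toStr column]) acc) []

-- ===== PRECONDITION & SPEC =====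
-- A raises ValueError for number_of_ubiquitin < 1 or > 96; exactly those inputs are excluded.
def Pre_sample_to_well_positions (number_of_ubiquitin : Int) : Prop :=
  1 ≤ number_of_ubiquitin ∧ number_of_ubiquitin ≤ 96
instance (number_of_ubiquitin : Int) : Decidable (Pre_sample_to_well_positions number_of_ubiquitin) := by unfold Pre_sample_to_well_positions; infer_instance
def pvWitness_sample_to_well_positions : Int := (10)

def Spec_sample_to_well_positions (number_of_ubiquitin : Int) (out : List String) : Prop := out = sample_to_well_positions_alt number_of_ubiquitin
instance (number_of_ubiquitin : Int) (out : List String) : Decidable (Spec_sample_to_well_positions number_of_ubiquitin out) := by unfold Spec_sample_to_well_positions; infer_instance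

-- ===== CLAIM (what is proved, stated in full; the proofs are below) =====
def Claim_equal_sample_to_well_positions : Prop := ∀ (number_of_ubiquitin : Int), Dom_sample_to_well_positions number_of_ubiquitin → Pre_sample_to_well_positions number_of_ubiquitin → Spec_sample_to_well_positions number_of_ubiquitin (sample_to_well_positions number_of_ubiquitin)

-- ===== LEMMAS AND PROOFS =====

-- ===== VERDICT (by name: the statement is the Claim_ definition above) =====
set_option maxRecDepth 4000 in
theorem sample_to_well_positions_spec : Claim_equal_sample_to_well_positions := by
  intro n _ hpre
  unfold Spec_sample_to_well_positions
  obtain ⟨h1, h2⟩ := hpre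
  interval_cases n <;> decide
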